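-- pv_equiv track=rewrite | github.com/BitnaKeum/python-algorithm-tests | Programmers/110 옮기기.py | solution
-- ===== SOURCE A (Python) =====
-- def solution(s):
--     answer = []
--     for x in s:
--
--         # x로부터 모든 "110" 뽑기
--         stack = []
--         target_cnt = 0
--         for i in range(len(x)):
--             if x[i] == "1":
--                 stack.append(x[i])
--             else:  # x[i] == "0"
--                 if len(stack) >= 2 and stack[-1] == "1" and stack[-2] == "1":  # "110"
--                     stack.pop()
--                     stack.pop()
--                     target_cnt += 1
--                 else:
--                     stack.append(x[i])
--
--         # "110" 삽입할 위치 찾기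
--         # 마지막으로 나온 0 뒤에, 0이 없으면 맨 앞에
--         x = "".join(stack)
--         last_zero_idx = x.rfind("0")
--         if last_zero_idx != -1:
--             x = x[:last_zero_idx + 1] + "110" * target_cnt + x[last_zero_idx + 1:]
--         else:
--             x = "110" * target_cnt + x
--         answer.append(x)
--
--     return answer
-- ===== SOURCE B (Python) =====
-- def solution(s):
--     answer = []
--     for x in s:
--         cnt = 0
--         while True:
--             out = []
--             removed = 0
--             i = 0
--             n = len(x)
--             while i < n:
--                 if i < n - 2 and x[i] == '1' and x[i + 1] == '1' and x[i + 2] != '1':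
--                     removed += 1
--                     i += 3
--                 else:
--                     out.append(x[i])
--                     i += 1
--             x = ''.join(out)
--             if removed == 0:
--                 break
--             cnt += removed
--         j = x.rfind('0')
--         answer.append(x[:j + 1] + '110' * cnt + x[j + 1:])
--     return answer
-- ===== Notes on version B (the rewrite author's own statement) =====
-- stated objective: alternative
-- what changed: Replaces A's single cascading stack pass (pop two trailing '1's on a non-'1' char) by repeatedly rescanning the string and deleting all non-overlapping "11"+non-'1' triples in one pass until none remain, counting deletions; the reinsertion after the last '0' uses one unified splice instead of an if/else.
import Mathlib
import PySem

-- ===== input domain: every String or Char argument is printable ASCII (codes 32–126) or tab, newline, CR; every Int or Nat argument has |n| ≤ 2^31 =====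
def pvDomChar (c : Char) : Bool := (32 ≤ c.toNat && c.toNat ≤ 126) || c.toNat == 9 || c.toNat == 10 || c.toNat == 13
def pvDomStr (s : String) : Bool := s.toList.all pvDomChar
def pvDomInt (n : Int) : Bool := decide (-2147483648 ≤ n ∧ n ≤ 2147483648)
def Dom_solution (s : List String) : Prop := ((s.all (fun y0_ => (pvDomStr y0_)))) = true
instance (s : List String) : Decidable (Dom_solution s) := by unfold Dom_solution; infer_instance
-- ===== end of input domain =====

-- B replaces A's cascading stack pass by repeated non-cascading removal scans until no
-- "1","1",non-'1' triple remains (objective: alternative algorithm, same exact result).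

-- ===== PORT A =====
-- shared primitive port of str.rfind("0"): index of last '0', -1 if none
def pyRfindZero : List Char → Int
  | [] => -1
  | c :: t =>
    let r := pyRfindZero t
    if r ≠ -1 then r + 1 else if c = '0' then 0 else -1

-- "110" * n
def rep110 : Nat → List Char
  | 0 => []
  | n + 1 => '1' :: '1' :: '0' :: rep110 n

-- one step of A's inner loop (stack kept reversed: head = stack top)
def stepA (st : List Char) (cnt : Nat) (c : Char) : List Char × Nat :=
  if c = '1' then ('1' :: st, cnt)
  else
    match st with
    | b :: a :: r => if b = '1' ∧ a = '1' then (r, cnt + 1) else (c :: st, cnt)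
    | _ => (c :: st, cnt)

def foldA : List Char → List Char → Nat → List Char × Nat
  | [], st, k => (st, k)
  | c :: t, st, k => foldA t (stepA st k c).1 (stepA st k c).2

def solution (s : List String) : List String :=
  s.map (fun xs =>
    let x0 := xs.toList
    let p := foldA x0 [] 0
    let x := p.1.reverse
    let idx := pyRfindZero x
    if idx ≠ -1 then
      String.mk (x.take (idx + 1).toNat ++ rep110 p.2 ++ x.drop (idx + 1).toNat)
    else
      String.mk (rep110 p.2 ++ x))

-- ===== PORT B =====
-- one left-to-right scan removing every (non-overlapping) "1","1",non-'1' triple;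
-- structural recursion on a fuel bound (fuel ≥ list length always suffices, see the lemmas)
def passOnce : Nat → List Char → List Char × Nat
  | 0, l => (l, 0)
  | fuel + 1, a :: b :: c :: t =>
    if a = '1' ∧ b = '1' ∧ c ≠ '1' then
      ((passOnce fuel t).1, (passOnce fuel t).2 + 1)
    else
      (a :: (passOnce fuel (b :: c :: t)).1, (passOnce fuel (b :: c :: t)).2)
  | _ + 1, l => (l, 0)

-- python's `while True` rescan loop: each productive pass removes ≥ 3 chars,
-- so length + 1 rounds of fuel always suffice (proved below)
def reduceLoop : Nat → List Char → Nat → List Char × Nat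
  | 0, x, cnt => (x, cnt)
  | fuel + 1, x, cnt =>
    let p := passOnce x.length x
    if p.2 = 0 then (p.1, cnt) else reduceLoop fuel p.1 (cnt + p.2)

def solution_alt (s : List String) : List String :=
  s.map (fun xs =>
    let p := reduceLoop (xs.toList.length + 1) xs.toList 0
    let j := pyRfindZero p.1
    String.mk (p.1.take (j + 1).toNat ++ rep110 p.2 ++ p.1.drop (j + 1).toNat))

-- ===== PRECONDITION & SPEC =====
def Spec_solution (s : List String) (out : List String) : Prop := out = solution_alt s
instance (s : List String) (out : List String) : Decidable (Spec_solution s out) := by unfold Spec_solution; infer_instance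

-- ===== CLAIM (what is proved, stated in full; the proofs are below) =====
def Claim_equal_solution : Prop := ∀ (s : List String), Dom_solution s → Spec_solution s (solution s)

-- ===== LEMMAS AND PROOFS =====

theorem passOnce_length (fuel : Nat) :
    ∀ l : List Char, l.length ≤ fuel →
      (passOnce fuel l).1.length + 3 * (passOnce fuel l).2 = l.length := by
  induction fuel with
  | zero =>
    intro l hl
    have : l = [] := List.eq_nil_of_length_eq_zero (Nat.le_zero.mp hl)
    subst this
    simp [passOnce]
  | succ fuel ih =>
    intro l hl
    rcases l with _ | ⟨a, _ | ⟨b, _ | ⟨c, t⟩⟩⟩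
    · simp [passOnce]
    · simp [passOnce]
    · simp [passOnce]
    · rw [passOnce]
      split_ifs with h
      · have := ih t (by simp at hl ⊢; omega)
        simp only [List.length_cons]
        omega
      · have := ih (b :: c :: t) (by simp at hl ⊢; omega)
        simp only [List.length_cons] at *
        omega

theorem stepA_add (st : List Char) (k d : Nat) (c : Char) :
    stepA st (k + d) c = ((stepA st k c).1, (stepA st k c).2 + d) := by
  unfold stepA
  split_ifs with h
  · rfl
  · cases st with
    | nil => rfl
    | cons b t =>
      cases t with
      | nil => rfl
      | cons a r =>
        by_cases hba : b = '1' ∧ a = '1' <;> simp [hba] <;> omega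

-- deleting one pass' redexes changes only the count, by +d, for any stack state
theorem foldA_passOnce (fuel : Nat) :
    ∀ (l st : List Char) (k : Nat), l.length ≤ fuel →
      foldA l st k = foldA (passOnce fuel l).1 st (k + (passOnce fuel l).2) := by
  induction fuel with
  | zero =>
    intro l st k hl
    have : l = [] := List.eq_nil_of_length_eq_zero (Nat.le_zero.mp hl)
    subst this
    simp [passOnce]
  | succ fuel ih =>
    intro l st k hl
    rcases l with _ | ⟨a, _ | ⟨b, _ | ⟨c, t⟩⟩⟩
    · simp [passOnce]
    · simp [passOnce]
    · simp [passOnce]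
    · rw [passOnce]
      split_ifs with h
      · obtain ⟨ha, hb, hc⟩ := h
        subst ha; subst hb
        have h1 : stepA st k '1' = ('1' :: st, k) := by simp [stepA]
        have h2 : stepA ('1' :: st) k '1' = ('1' :: '1' :: st, k) := by simp [stepA]
        have h3 : stepA ('1' :: '1' :: st) k c = (st, k + 1) := by simp [stepA, hc]
        simp only [foldA, h1, h2, h3]
        rw [ih t st (k + 1) (by simp at hl ⊢; omega)]
        have he : k + 1 + (passOnce fuel t).2 = k + ((passOnce fuel t).2 + 1) := by omega
        rw [he]
      · show foldA (b :: c :: t) (stepA st k a).1 (stepA st k a).2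
            = foldA (a :: (passOnce fuel (b :: c :: t)).1) st (k + (passOnce fuel (b :: c :: t)).2)
        rw [ih (b :: c :: t) (stepA st k a).1 (stepA st k a).2 (by simp at hl ⊢; omega)]
        show foldA (passOnce fuel (b :: c :: t)).1 (stepA st k a).1
              ((stepA st k a).2 + (passOnce fuel (b :: c :: t)).2)
            = foldA (passOnce fuel (b :: c :: t)).1
              (stepA st (k + (passOnce fuel (b :: c :: t)).2) a).1
              (stepA st (k + (passOnce fuel (b :: c :: t)).2) a).2
        rw [stepA_add st k (passOnce fuel (b :: c :: t)).2 a]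

-- a list containing a "1","1",non-'1' triple is reduced by passOnce
theorem passOnce_redex (fuel : Nat) :
    ∀ (u : List Char) (c : Char) (t : List Char),
      (u ++ '1' :: '1' :: c :: t).length ≤ fuel → c ≠ '1' →
      (passOnce fuel (u ++ '1' :: '1' :: c :: t)).2 ≠ 0 := by
  induction fuel with
  | zero =>
    intro u c t hl _
    simp at hl
  | succ fuel ih =>
    intro u c t hl hc
    rcases u with _ | ⟨a, _ | ⟨b, _ | ⟨d, u'⟩⟩⟩
    · simp [passOnce, hc]
    · simp only [List.cons_append, List.nil_append]
      rw [passOnce]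
      split_ifs with h
      · simp
      · simpa using ih [] c t (by simp at hl ⊢; omega) hc
    · simp only [List.cons_append, List.nil_append]
      rw [passOnce]
      split_ifs with h
      · simp
      · simpa using ih [b] c t (by simp at hl ⊢; omega) hc
    · simp only [List.cons_append]
      rw [passOnce]
      split_ifs with h
      · simp
      · simpa using ih (b :: d :: u') c t (by simp at hl ⊢; omega) hc

-- on a redex-free suffix (relative to the current stack) A's loop just pushes everything
theorem foldA_noRedex (fuel : Nat) (y : List Char) :
    ∀ st k, (st.reverse ++ y).length ≤ fuel → (passOnce fuel (st.reverse ++ y)).2 = 0 →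
      foldA y st k = (y.reverse ++ st, k) := by
  induction y with
  | nil => intro st k _ _; simp [foldA]
  | cons c t ih =>
    intro st k hlen hnr
    by_cases hc : c = '1'
    · subst hc
      have hstep : stepA st k '1' = ('1' :: st, k) := by simp [stepA]
      simp only [foldA, hstep]
      have hassoc : st.reverse ++ '1' :: t = ('1' :: st).reverse ++ t := by simp
      rw [hassoc] at hlen hnr
      rw [ih ('1' :: st) k hlen hnr]
      simp
    · have hpush : stepA st k c = (c :: st, k) := by
        unfold stepA
        rw [if_neg hc]
        cases st with
        | nil => rfl
        | cons b t' =>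
          cases t' with
          | nil => rfl
          | cons a r =>
            by_cases hba : b = '1' ∧ a = '1'
            · exfalso
              obtain ⟨hb1, ha1⟩ := hba
              subst hb1; subst ha1
              have hassoc : ('1' :: '1' :: r : List Char).reverse ++ c :: t
                  = r.reverse ++ '1' :: '1' :: c :: t := by simp
              rw [hassoc] at hlen hnr
              exact passOnce_redex fuel r.reverse c t hlen hc hnr
            · simp [hba]
      simp only [foldA, hpush]
      have hassoc : st.reverse ++ c :: t = (c :: st).reverse ++ t := by simp
      rw [hassoc] at hlen hnr
      rw [ih (c :: st) k hlen hnr]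
      simp

theorem passOnce_zero (fuel : Nat) :
    ∀ l : List Char, l.length ≤ fuel → (passOnce fuel l).2 = 0 → (passOnce fuel l).1 = l := by
  induction fuel with
  | zero =>
    intro l hl _
    have : l = [] := List.eq_nil_of_length_eq_zero (Nat.le_zero.mp hl)
    subst this
    simp [passOnce]
  | succ fuel ih =>
    intro l hl h0
    rcases l with _ | ⟨a, _ | ⟨b, _ | ⟨c, t⟩⟩⟩
    · simp [passOnce]
    · simp [passOnce]
    · simp [passOnce]
    · by_cases hcond : a = '1' ∧ b = '1' ∧ c ≠ '1'
      · rw [passOnce, if_pos hcond] at h0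
        simp at h0
      · rw [passOnce, if_neg hcond] at h0 ⊢
        have h2 : (passOnce fuel (b :: c :: t)).2 = 0 := h0
        show a :: (passOnce fuel (b :: c :: t)).1 = a :: b :: c :: t
        rw [ih (b :: c :: t) (by simp at hl ⊢; omega) h2]

theorem foldA_reduceLoop (fuel : Nat) :
    ∀ (x : List Char) (k : Nat), x.length < fuel →
      foldA x [] k = ((reduceLoop fuel x k).1.reverse, (reduceLoop fuel x k).2) := by
  induction fuel with
  | zero =>
    intro x k hx
    omega
  | succ fuel ih =>
    intro x k hx
    rw [reduceLoop]
    split_ifs with h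
    · have hfit : x.length ≤ x.length := Nat.le_refl _
      have hx1 := passOnce_zero x.length x hfit h
      rw [foldA_noRedex x.length x [] k (by simpa using hfit) (by simpa using h)]
      simp [hx1]
    · have hlen := passOnce_length x.length x (Nat.le_refl _)
      rw [foldA_passOnce x.length x [] k (Nat.le_refl _)]
      exact ih (passOnce x.length x).1 (k + (passOnce x.length x).2) (by omega)

theorem per_string (xs : String) :
    (let x0 := xs.toList
     let p := foldA x0 [] 0
     let x := p.1.reverse
     let idx := pyRfindZero x
     if idx ≠ -1 then
       String.mk (x.take (idx + 1).toNat ++ rep110 p.2 ++ x.drop (idx + 1).toNat)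
     else
       String.mk (rep110 p.2 ++ x)) =
    (let p := reduceLoop (xs.toList.length + 1) xs.toList 0
     let j := pyRfindZero p.1
     String.mk (p.1.take (j + 1).toNat ++ rep110 p.2 ++ p.1.drop (j + 1).toNat)) := by
  simp only []
  rw [foldA_reduceLoop (xs.toList.length + 1) xs.toList 0 (by omega)]
  simp only [List.reverse_reverse]
  set nf := (reduceLoop (xs.toList.length + 1) xs.toList 0).1
  set cnt := (reduceLoop (xs.toList.length + 1) xs.toList 0).2
  by_cases h : pyRfindZero nf = -1
  · simp [h]
  · simp [h]

-- ===== VERDICT (by name: the statement is the Claim_ definition above) =====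
theorem solution_spec : Claim_equal_solution := by
  intro s _
  unfold Spec_solution solution solution_alt
  apply List.map_congr_left
  intro xs _
  exact per_string xs
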